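-- pv_equiv track=rewrite | github.com/darko93/PhaseTransition | Python scripts/ConvertQuantitiesToGnuplotFormat.py | ConvertToGnuplotFormat
-- ===== SOURCE A (Python) =====
-- def ConvertToGnuplotFormat(quantitiesLines):
--     newQuantitiesLines = []
--     iQuantitiesLine = ""
--     charsList = []
--     for i in range(0, len(quantitiesLines)):
--         iQuantitiesLine = quantitiesLines[i]
--         if i < 5:
--             iQuantitiesLine = "#" + iQuantitiesLine
--         elif i == 7:
--             charsList = list(iQuantitiesLine)
--             charsList[0] = "#"
--             iQuantitiesLine = "".join(charsList)
--         newQuantitiesLines.append(iQuantitiesLine)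
--     return newQuantitiesLines
-- ===== SOURCE B (Python) =====
-- def ConvertToGnuplotFormat(quantitiesLines):
--     head = ["#" + line for line in quantitiesLines[:5]]
--     mid = quantitiesLines[5:7]
--     tail = quantitiesLines[7:]
--     if tail:
--         tail = ["#" + tail[0][1:]] + tail[1:]
--     return head + mid + tail
-- ===== Notes on version B (the rewrite author's own statement) =====
-- stated objective: simpler
-- what changed: B has no loop over indices at all: it slices the list into three segments (first five lines, the untouched middle, the remainder from line 7), marks the segments wholesale (comprehension on the head, one rebuilt first element of the tail) and concatenates them, instead of A's element-by-element indexed loop with a branch chain and an appended accumulator.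
import Mathlib
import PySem

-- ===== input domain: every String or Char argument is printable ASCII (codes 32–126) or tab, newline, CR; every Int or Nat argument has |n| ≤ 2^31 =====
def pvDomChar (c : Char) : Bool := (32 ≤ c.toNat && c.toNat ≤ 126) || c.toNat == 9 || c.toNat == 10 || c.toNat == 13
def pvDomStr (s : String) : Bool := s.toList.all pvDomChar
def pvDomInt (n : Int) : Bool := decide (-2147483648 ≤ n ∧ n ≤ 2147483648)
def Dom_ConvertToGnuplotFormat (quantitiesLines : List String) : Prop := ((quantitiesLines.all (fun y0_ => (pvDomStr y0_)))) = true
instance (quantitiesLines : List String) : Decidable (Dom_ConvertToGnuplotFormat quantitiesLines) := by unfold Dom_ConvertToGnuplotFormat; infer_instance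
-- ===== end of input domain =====

-- B slices the list into three segments and marks them wholesale (no indexed loop) instead of
-- A's element-by-element loop with a branch chain; objective: simpler. Return value only.

-- ===== PORT A =====
def ConvertToGnuplotFormat (quantitiesLines : List String) : List String :=
  (PySem.List.pyRange 0 (quantitiesLines.length : Int) 1).foldl
    (fun newQuantitiesLines i =>
      let iQuantitiesLine := PySem.List.pyGetD quantitiesLines i ""
      let iQuantitiesLine :=
        if i < 5 then "#" ++ iQuantitiesLine
        else if i = 7 then
          -- charsList[0] = "#": Python raises IndexError on an empty line; excluded by Pre_
          String.ofList (iQuantitiesLine.toList.set 0 '#')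
        else iQuantitiesLine
      newQuantitiesLines ++ [iQuantitiesLine]) []

-- ===== PORT B =====
def ConvertToGnuplotFormat_alt (quantitiesLines : List String) : List String :=
  let head := (PySem.List.slice quantitiesLines none (some 5)).map (fun line => "#" ++ line)
  let mid := PySem.List.slice quantitiesLines (some 5) (some 7)
  let tail := PySem.List.slice quantitiesLines (some 7) none
  let tail :=
    if tail ≠ [] then
      ("#" ++ PySem.Str.slice (tail.headD "") (some 1) none) :: PySem.List.slice tail (some 1) none
    else tail
  head ++ mid ++ tail

-- ===== PRECONDITION & SPEC =====
-- Pre_ excludes exactly the inputs where Python A raises IndexError: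
-- a list with more than 7 lines whose line at index 7 is empty.
def Pre_ConvertToGnuplotFormat (quantitiesLines : List String) : Prop :=
  7 < quantitiesLines.length → quantitiesLines.getD 7 "" ≠ ""
instance (quantitiesLines : List String) : Decidable (Pre_ConvertToGnuplotFormat quantitiesLines) := by
  unfold Pre_ConvertToGnuplotFormat; infer_instance

def pvWitness_ConvertToGnuplotFormat : List String := ["a", "b", "c"]

def Spec_ConvertToGnuplotFormat (quantitiesLines : List String) (out : List String) : Prop := out = ConvertToGnuplotFormat_alt quantitiesLines
instance (quantitiesLines : List String) (out : List String) : Decidable (Spec_ConvertToGnuplotFormat quantitiesLines out) := by unfold Spec_ConvertToGnuplotFormat; infer_instance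

-- ===== CLAIM =====
def Claim_equal_ConvertToGnuplotFormat : Prop := ∀ (quantitiesLines : List String), Dom_ConvertToGnuplotFormat quantitiesLines → Pre_ConvertToGnuplotFormat quantitiesLines → Spec_ConvertToGnuplotFormat quantitiesLines (ConvertToGnuplotFormat quantitiesLines)
-- ===== LEMMAS AND PROOFS =====

-- the per-index result A computes
def pvLine (quantitiesLines : List String) (k : Nat) : String :=
  let s := quantitiesLines.getD k ""
  if k < 5 then "#" ++ s
  else if k = 7 then String.ofList (s.toList.set 0 '#')
  else s

lemma A_eq_map (qs : List String) :
    ConvertToGnuplotFormat qs = (List.range qs.length).map (pvLine qs) := by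
  unfold ConvertToGnuplotFormat
  rw [PySem.List.foldl_append_singleton_eq_map, PySem.List.pyRange_one]
  simp only [List.nil_append, List.map_map, sub_zero, Int.toNat_natCast]
  refine List.map_congr_left ?_
  intro k hk
  simp only [Function.comp, zero_add, PySem.List.pyGetD_natCast, pvLine]
  by_cases hk5 : k < 5
  · simp [hk5, show (k : Int) < 5 by exact_mod_cast hk5]
  · have : ¬ ((k : Int) < 5) := by exact_mod_cast hk5
    by_cases hk7 : k = 7
    · simp [hk7]
    · have : ¬ ((k : Int) = 7) := by exact_mod_cast hk7
      simp_all

lemma B_eq_map (qs : List String) (hpre : Pre_ConvertToGnuplotFormat qs) :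
    ConvertToGnuplotFormat_alt qs = (List.range qs.length).map (pvLine qs) := by
  have h1 : PySem.List.slice qs none (some 5) = qs.take 5 := by simp [pysem]
  have h2 : PySem.List.slice qs (some 5) (some 7) = (qs.drop 5).take 2 := by simp [pysem]
  have h3 : PySem.List.slice qs (some 7) none = qs.drop 7 := by simp [pysem]
  simp only [ConvertToGnuplotFormat_alt]
  rw [h1, h2, h3]
  by_cases h7 : 7 < qs.length
  · have hget7 : qs.getD 7 "" = qs[7]'h7 := by
      rw [List.getD_eq_getElem?_getD, List.getElem?_eq_getElem h7]; rfl
    have hne : qs[7]'h7 ≠ "" := by rw [← hget7]; exact hpre h7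
    have hdrop : qs.drop 7 = qs[7]'h7 :: qs.drop 8 := List.drop_eq_getElem_cons h7
    rw [hdrop]
    simp only [ne_eq, reduceCtorEq, not_false_eq_true, if_true,
      PySem.List.slice_from_one, List.headD_cons, List.tail_cons]
    -- the rebuilt line 7 equals A's set-first-char line
    have hline7 : "#" ++ PySem.Str.slice (qs[7]'h7) (some 1) none
        = String.ofList ((qs[7]'h7).toList.set 0 '#') := by
      apply String.toList_injective
      rw [String.toList_append, PySem.Str.toList_slice]
      simp only [PySem.Chars.slice_eq_listSlice, PySem.List.slice_from_one]
      cases hc : (qs[7]'h7).toList with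
      | nil => exact absurd (String.toList_injective (by simpa using hc)) hne
      | cons c cs => simp [String.toList_ofList]
    rw [hline7]
    apply List.ext_getElem
    · simp only [List.length_append, List.length_map, List.length_take, List.length_cons,
        List.length_drop, List.length_range]
      omega
    intro k hk1 hk2
    have hklen : k < qs.length := by simpa using hk2
    rw [List.getElem_map, List.getElem_range]
    have hhead : ((qs.take 5).map (fun line => "#" ++ line)).length = 5 := by
      simp only [List.length_map, List.length_take]; omega
    have hmid : ((qs.drop 5).take 2).length = 2 := by
      simp only [List.length_take, List.length_drop]; omega
    have hpv : ∀ hk : k < qs.length, ¬ k < 5 → k ≠ 7 → pvLine qs k = qs[k]'hk := by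
      intro hk hk5 hk7
      simp [pvLine, hk5, hk7, List.getD_eq_getElem?_getD, List.getElem?_eq_getElem hk]
    by_cases hk5 : k < 5
    · rw [List.getElem_append_left (by rw [List.length_append, hhead, hmid]; omega),
        List.getElem_append_left (by rw [hhead]; omega), List.getElem_map, List.getElem_take]
      simp [pvLine, hk5, List.getD_eq_getElem?_getD, List.getElem?_eq_getElem hklen]
    · by_cases hk7lt : k < 7
      · rw [List.getElem_append_left (by rw [List.length_append, hhead, hmid]; omega),
          List.getElem_append_right (by rw [hhead]; omega), List.getElem_take, List.getElem_drop,
          hpv hklen hk5 (by omega)]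
        congr 1
        rw [hhead]
        omega
      · rw [List.getElem_append_right (by rw [List.length_append, hhead, hmid]; omega)]
        simp only [List.length_append, hhead, hmid]
        by_cases hk7 : k = 7
        · subst hk7
          simp only [show 7 - (5 + 2) = 0 by norm_num, List.getElem_cons_zero]
          simp [pvLine, List.getD_eq_getElem?_getD, List.getElem?_eq_getElem h7]
        · rw [List.getElem_cons]
          have h0 : ¬ (k - (5 + 2) = 0) := by omega
          rw [dif_neg h0, List.getElem_drop, hpv hklen hk5 hk7]
          congr 1
          omega
  · have hdropnil : qs.drop 7 = [] := List.drop_eq_nil_of_le (by omega)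
    rw [hdropnil]
    simp only [ne_eq, not_true_eq_false, if_false, List.append_nil]
    apply List.ext_getElem
    · simp only [List.length_append, List.length_map, List.length_take, List.length_drop,
        List.length_range]
      omega
    intro k hk1 hk2
    have hklen : k < qs.length := by simpa using hk2
    rw [List.getElem_map, List.getElem_range]
    have hhead : ((qs.take 5).map (fun line => "#" ++ line)).length = min 5 qs.length := by
      simp [List.length_take]
    by_cases hk5 : k < 5
    · rw [List.getElem_append_left (by rw [hhead]; omega), List.getElem_map, List.getElem_take]
      simp [pvLine, hk5, List.getD_eq_getElem?_getD, List.getElem?_eq_getElem hklen]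
    · rw [List.getElem_append_right (by rw [hhead]; omega), List.getElem_take, List.getElem_drop]
      have hpv : pvLine qs k = qs[k]'hklen := by
        simp [pvLine, hk5, show k ≠ 7 by omega, List.getD_eq_getElem?_getD,
          List.getElem?_eq_getElem hklen]
      rw [hpv]
      congr 1
      rw [hhead]
      omega

-- ===== VERDICT =====
theorem ConvertToGnuplotFormat_spec : Claim_equal_ConvertToGnuplotFormat := by
  intro qs _ hpre
  unfold Spec_ConvertToGnuplotFormat
  rw [A_eq_map, B_eq_map qs hpre]
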